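-- pv_equiv track=rewrite | github.com/MiguelFaria57/IPPS-Resolution_of_Problems_using_Python | src/Exercises6/Ex6_18.py | verSeSaoIrmaos
-- ===== SOURCE A (Python) =====
-- def verSeSaoIrmaos(dic, pes1, pes2):
--     paisPes1=[]
--     paisPes2=[]
--     for k,v in dic.items():
--         if pes1 in v:
--             paisPes1 += [k]
--         if pes2 in v:
--             paisPes2 += [k]
--     return paisPes1 == paisPes2
-- ===== SOURCE B (Python) =====
-- def verSeSaoIrmaos(dic, pes1, pes2):
--     for v in dic.values():
--         if (pes1 in v) != (pes2 in v):
--             return False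
--     return True
-- ===== Notes on version B (the rewrite author's own statement) =====
-- stated objective: simpler
-- what changed: Instead of accumulating two parent-key lists and comparing them at the end, B makes one pass over the values and short-circuits to False at the first value where the two memberships disagree, keeping no lists at all.
import Mathlib
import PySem

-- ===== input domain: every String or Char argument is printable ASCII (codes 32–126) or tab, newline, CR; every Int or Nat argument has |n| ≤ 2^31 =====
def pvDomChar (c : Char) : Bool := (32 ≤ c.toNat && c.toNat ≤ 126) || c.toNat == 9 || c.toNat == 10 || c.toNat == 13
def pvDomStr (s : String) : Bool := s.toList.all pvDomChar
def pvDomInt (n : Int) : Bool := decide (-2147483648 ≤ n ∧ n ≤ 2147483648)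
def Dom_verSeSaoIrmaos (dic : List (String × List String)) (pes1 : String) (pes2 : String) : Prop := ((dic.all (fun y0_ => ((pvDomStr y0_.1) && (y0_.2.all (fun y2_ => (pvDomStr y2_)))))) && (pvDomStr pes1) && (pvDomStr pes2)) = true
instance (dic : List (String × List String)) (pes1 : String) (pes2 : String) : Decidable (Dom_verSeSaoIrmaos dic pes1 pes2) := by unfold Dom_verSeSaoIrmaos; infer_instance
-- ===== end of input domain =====

-- B replaces the two accumulated parent-key lists by a single short-circuiting pass
-- that checks the two memberships agree on every value (objective: simpler).
-- ===== PORT A =====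
def verSeSaoIrmaos (dic : List (String × List String)) (pes1 : String) (pes2 : String) : Bool :=
  let st := dic.foldl (fun (st : List String × List String) kv =>
    let p1 := if kv.2.contains pes1 then st.1 ++ [kv.1] else st.1
    let p2 := if kv.2.contains pes2 then st.2 ++ [kv.1] else st.2
    (p1, p2)) ([], [])
  st.1 == st.2

-- ===== PORT B =====
def verSeSaoIrmaos_alt (dic : List (String × List String)) (pes1 : String) (pes2 : String) : Bool :=
  match dic with
  | [] => true
  | kv :: rest =>
      (kv.2.contains pes1 == kv.2.contains pes2) && verSeSaoIrmaos_alt rest pes1 pes2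

-- ===== PRECONDITION & SPEC =====
-- Pre_ states the Python dict invariant: the association list has pairwise-distinct
-- keys (a Python dict cannot hold duplicate keys, so no Python input is excluded).
def Pre_verSeSaoIrmaos (dic : List (String × List String)) (pes1 : String) (pes2 : String) : Prop :=
  (dic.map Prod.fst).Nodup
instance (dic : List (String × List String)) (pes1 : String) (pes2 : String) : Decidable (Pre_verSeSaoIrmaos dic pes1 pes2) := by unfold Pre_verSeSaoIrmaos; infer_instance
def pvWitness_verSeSaoIrmaos : (List (String × List String)) × String × String :=
  ([("ana", ["rui", "zoe"]), ("bea", ["rui"])], "rui", "zoe")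
def Spec_verSeSaoIrmaos (dic : List (String × List String)) (pes1 : String) (pes2 : String) (out : Bool) : Prop := out = verSeSaoIrmaos_alt dic pes1 pes2
instance (dic : List (String × List String)) (pes1 : String) (pes2 : String) (out : Bool) : Decidable (Spec_verSeSaoIrmaos dic pes1 pes2 out) := by unfold Spec_verSeSaoIrmaos; infer_instance

-- ===== CLAIM (what is proved, stated in full; the proofs are below) =====
def Claim_equal_verSeSaoIrmaos : Prop := ∀ (dic : List (String × List String)) (pes1 : String) (pes2 : String), Dom_verSeSaoIrmaos dic pes1 pes2 → Pre_verSeSaoIrmaos dic pes1 pes2 → Spec_verSeSaoIrmaos dic pes1 pes2 (verSeSaoIrmaos dic pes1 pes2)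

-- ===== LEMMAS AND PROOFS =====

/-- The parent-key list A builds for a person: keys of entries whose value contains p. -/
def pais (dic : List (String × List String)) (p : String) : List String :=
  (dic.filter (fun kv => kv.2.contains p)).map Prod.fst

lemma foldA (dic : List (String × List String)) (pes1 pes2 : String) (l1 l2 : List String) :
    dic.foldl (fun (st : List String × List String) kv =>
      let p1 := if kv.2.contains pes1 then st.1 ++ [kv.1] else st.1
      let p2 := if kv.2.contains pes2 then st.2 ++ [kv.1] else st.2
      (p1, p2)) (l1, l2) = (l1 ++ pais dic pes1, l2 ++ pais dic pes2) := by
  induction dic generalizing l1 l2 with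
  | nil => simp [pais]
  | cons kv rest ih =>
      simp only [List.foldl_cons, ih, pais, List.filter_cons]
      by_cases h1 : pes1 ∈ kv.2 <;>
        by_cases h2 : pes2 ∈ kv.2 <;>
        simp [h1, h2]

lemma pais_subset_keys (dic : List (String × List String)) (p : String) (k : String)
    (hk : k ∈ pais dic p) : k ∈ dic.map Prod.fst := by
  simp only [pais, List.mem_map] at hk ⊢
  obtain ⟨kv, hkv, rfl⟩ := hk
  exact ⟨kv, List.mem_of_mem_filter hkv, rfl⟩

lemma pais_eq_iff_alt (dic : List (String × List String)) (pes1 pes2 : String)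
    (hnd : (dic.map Prod.fst).Nodup) :
    (pais dic pes1 == pais dic pes2) = verSeSaoIrmaos_alt dic pes1 pes2 := by
  induction dic with
  | nil => simp [pais, verSeSaoIrmaos_alt]
  | cons kv rest ih =>
      simp only [List.map_cons, List.nodup_cons] at hnd
      obtain ⟨hk, hnd'⟩ := hnd
      have ih' := ih hnd'
      by_cases h1 : pes1 ∈ kv.2 <;> by_cases h2 : pes2 ∈ kv.2
      · simp [verSeSaoIrmaos_alt, pais, h1, h2]
        simpa [pais] using ih'
      · simp [verSeSaoIrmaos_alt, pais, h1, h2]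
        intro heq
        have hmem : kv.1 ∈ List.map Prod.fst (List.filter (fun kv => decide (pes2 ∈ kv.2)) rest) :=
          heq ▸ List.mem_cons_self
        exact hk (pais_subset_keys rest pes2 kv.1 (by simpa [pais] using hmem))
      · simp [verSeSaoIrmaos_alt, pais, h1, h2]
        intro heq
        have hmem : kv.1 ∈ List.map Prod.fst (List.filter (fun kv => decide (pes1 ∈ kv.2)) rest) :=
          heq.symm ▸ List.mem_cons_self
        exact hk (pais_subset_keys rest pes1 kv.1 (by simpa [pais] using hmem))
      · simp [verSeSaoIrmaos_alt, pais, h1, h2]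
        simpa [pais] using ih'

-- ===== VERDICT (by name: the statement is the Claim_ definition above) =====
theorem verSeSaoIrmaos_spec : Claim_equal_verSeSaoIrmaos := by
  intro dic pes1 pes2 _ hpre
  unfold Spec_verSeSaoIrmaos verSeSaoIrmaos
  rw [foldA]
  simpa using pais_eq_iff_alt dic pes1 pes2 hpre
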